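-- pv_equiv track=rewrite | github.com/JadielTeofilo/General-Algorithms | src/green_book/hard/majority_number_fixed.py | find_candidate
-- ===== SOURCE A (Python) =====
-- from typing import List, Optional
--
-- def find_candidate(numbers: List[int]) -> Optional[int]:
-- 	validating_index: int = 0
-- 	while validating_index < len(numbers):
-- 		target: int = numbers[validating_index]
-- 		target_delta: int = 1
-- 		neighbor: int = validating_index + 1
-- 		while neighbor < len(numbers):
-- 			if target != numbers[neighbor]:
-- 				target_delta -= 1
-- 			else:
-- 				target_delta += 1
-- 			if target_delta == 0:
-- 				# Target is not majority, skip to next subarray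
-- 				validating_index = neighbor + 1
-- 				break
-- 			neighbor += 1
-- 		# Case when the neighbor went through the whole array
-- 		if target_delta != 0:
-- 			return target
-- 	return None
-- ===== SOURCE B (Python) =====
-- from typing import List, Optional
--
-- def find_candidate(numbers: List[int]) -> Optional[int]:
--     candidate: Optional[int] = None
--     count: int = 0
--     for x in numbers:
--         if count == 0:
--             candidate = x
--             count = 1
--         elif x == candidate:
--             count += 1
--         else:
--             count -= 1
--     return candidate if count > 0 else None
-- ===== Notes on version B (the rewrite author's own statement) =====
-- stated objective: idiomatic
-- what changed: Replaced A's nested while-loops that restart the scan at a new index after each zeroed delta by the canonical single-pass Boyer-Moore fold over a (candidate, count) accumulator, returning the candidate iff the final count is positive.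
import Mathlib
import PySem

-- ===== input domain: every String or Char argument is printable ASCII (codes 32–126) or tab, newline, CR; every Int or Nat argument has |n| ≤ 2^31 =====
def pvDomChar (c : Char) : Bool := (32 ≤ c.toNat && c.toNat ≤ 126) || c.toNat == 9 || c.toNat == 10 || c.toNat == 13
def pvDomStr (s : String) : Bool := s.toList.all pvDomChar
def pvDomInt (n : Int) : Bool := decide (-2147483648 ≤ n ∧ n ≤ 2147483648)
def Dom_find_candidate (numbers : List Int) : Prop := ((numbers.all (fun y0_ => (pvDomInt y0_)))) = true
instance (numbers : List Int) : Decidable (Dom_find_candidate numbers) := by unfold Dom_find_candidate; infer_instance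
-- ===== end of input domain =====

-- B replaces A's nested restart-at-index while-loops by the canonical single-pass
-- Boyer–Moore fold over a (candidate, count) accumulator (objective: idiomatic/simpler).

-- ===== PORT A =====
-- A's inner while loop: scan `rest` (the elements after the current target),
-- updating target_delta; returns (final delta, remaining suffix after the break).
-- The index `neighbor` is represented by the suffix of `numbers` it points to.
def find_candidate_inner (target : Int) (delta : Int) (rest : List Int) : Int × List Int :=
  match rest with
  | [] => (delta, [])
  | x :: xs =>
    let delta' := if target ≠ x then delta - 1 else delta + 1
    if delta' = 0 then (0, xs) else find_candidate_inner target delta' xs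

theorem find_candidate_inner_len (target delta : Int) (rest : List Int) :
    (find_candidate_inner target delta rest).2.length ≤ rest.length := by
  induction rest generalizing delta with
  | nil => simp [find_candidate_inner]
  | cons x xs ih =>
    simp only [find_candidate_inner]
    split
    next h =>
      split
      · simp
      · exact le_trans (ih _) (by simp)
    next h =>
      split
      · simp
      · exact le_trans (ih _) (by simp)

-- A's outer while loop: `validating_index` is represented by the suffix it points to.
def find_candidate (numbers : List Int) : Option Int :=
  match numbers with
  | [] => none
  | x :: xs =>
    let p := find_candidate_inner x 1 xs
    if p.1 ≠ 0 then some x else find_candidate p.2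
termination_by numbers.length
decreasing_by
  exact Nat.lt_succ_of_le (find_candidate_inner_len x 1 xs)

-- ===== PORT B =====
def find_candidate_alt_step (s : Option Int × Int) (x : Int) : Option Int × Int :=
  if s.2 = 0 then (some x, 1)
  else if some x = s.1 then (s.1, s.2 + 1)
  else (s.1, s.2 - 1)

def find_candidate_alt (numbers : List Int) : Option Int :=
  let s := numbers.foldl find_candidate_alt_step (none, 0)
  if s.2 > 0 then s.1 else none

-- ===== PRECONDITION & SPEC =====
def Spec_find_candidate (numbers : List Int) (out : Option Int) : Prop := out = find_candidate_alt numbers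
instance (numbers : List Int) (out : Option Int) : Decidable (Spec_find_candidate numbers out) := by unfold Spec_find_candidate; infer_instance

-- ===== CLAIM (what is proved, stated in full; the proofs are below) =====
def Claim_equal_find_candidate : Prop := ∀ (numbers : List Int), Dom_find_candidate numbers → Spec_find_candidate numbers (find_candidate numbers)

-- ===== LEMMAS AND PROOFS =====

-- Inner-loop / fold correspondence: starting from a positive count, the fold over l
-- either ends exactly where the inner loop breaks (count 0), or finishes the list
-- with the same positive count.
theorem inner_fold (l : List Int) (t d : Int) (hd : 0 < d) :
    (∀ d' r, find_candidate_inner t d l = (d', r) →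
      (d' = 0 → l.foldl find_candidate_alt_step (some t, d) = r.foldl find_candidate_alt_step (some t, 0)) ∧
      (d' ≠ 0 → 0 < d' ∧ l.foldl find_candidate_alt_step (some t, d) = (some t, d'))) := by
  induction l generalizing d with
  | nil =>
    intro d' r h
    simp [find_candidate_inner] at h
    obtain ⟨h1, h2⟩ := h
    subst h1; subst h2
    exact ⟨fun h0 => absurd h0 (by omega), fun _ => ⟨hd, by simp⟩⟩
  | cons x xs ih =>
    intro d' r h
    simp only [find_candidate_inner] at h
    have hstep : find_candidate_alt_step (some t, d) x =
        (some t, if t ≠ x then d - 1 else d + 1) := by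
      simp only [find_candidate_alt_step]
      have hd0 : ¬ (d = 0) := by omega
      by_cases hx : x = t
      · simp [hx, hd0]
      · simp [hx, hd0, Ne.symm hx]
    set δ := if t ≠ x then d - 1 else d + 1 with hδ
    by_cases h0 : δ = 0
    · simp only [h0] at h
      obtain ⟨h1, h2⟩ := Prod.mk.injEq .. ▸ h
      subst h1; subst h2
      refine ⟨fun _ => ?_, fun hne => absurd rfl hne⟩
      simp [List.foldl, hstep, h0]
    · simp only [if_neg h0] at h
      have hδpos : 0 < δ := by
        have : δ = d - 1 ∨ δ = d + 1 := by
          rw [hδ]; split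
          · exact Or.inl rfl
          · exact Or.inr rfl
        omega
      have := ih δ hδpos d' r h
      simp only [List.foldl, hstep]
      exact this

-- With count 0, the final answer does not depend on the stored candidate.
theorem fold_zero_final (r : List Int) (c c' : Option Int) :
    (if (r.foldl find_candidate_alt_step (c, 0)).2 > 0 then (r.foldl find_candidate_alt_step (c, 0)).1 else none)
      = (if (r.foldl find_candidate_alt_step (c', 0)).2 > 0 then (r.foldl find_candidate_alt_step (c', 0)).1 else none) := by
  cases r with
  | nil => simp
  | cons x xs => simp [List.foldl, find_candidate_alt_step]

theorem main_eq (numbers : List Int) : find_candidate numbers = find_candidate_alt numbers := by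
  induction hn : numbers.length using Nat.strong_induction_on generalizing numbers with
  | _ n ih =>
    cases numbers with
    | nil => simp [find_candidate, find_candidate_alt]
    | cons x xs =>
      rw [find_candidate]
      rcases hir : find_candidate_inner x 1 xs with ⟨d', r⟩
      by_cases hz : d' = 0
      · -- break case: A recurses on r; B's fold reaches (some x, 0) before r
        have h := (inner_fold xs x 1 (by omega) d' r hir).1 hz
        have hr : r.length < n := by
          have := find_candidate_inner_len x 1 xs
          rw [hir] at this
          simp at this
          simp at hn
          omega
        have hIH := ih r.length hr r rfl
        simp only [hz, ne_eq, not_true_eq_false, if_false]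
        rw [hIH]
        simp only [find_candidate_alt, List.foldl]
        have hstep0 : find_candidate_alt_step (none, 0) x = (some x, 1) := by
          simp [find_candidate_alt_step]
        rw [hstep0, h]
        exact fold_zero_final r none (some x)
      · -- return case: inner loop finished the list with positive delta
        have h := (inner_fold xs x 1 (by omega) d' r hir).2 hz
        simp only [ne_eq, hz, not_false_eq_true, if_true]
        simp only [find_candidate_alt, List.foldl]
        have hstep0 : find_candidate_alt_step (none, 0) x = (some x, 1) := by
          simp [find_candidate_alt_step]
        rw [hstep0, h.2]
        have : 0 < d' := h.1
        simp [this]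

-- ===== VERDICT (by name: the statement is the Claim_ definition above) =====
theorem find_candidate_spec : Claim_equal_find_candidate := by
  intro numbers _
  unfold Spec_find_candidate
  exact main_eq numbers
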